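-- pv_equiv track=rewrite | github.com/Palmcivet/CTF-Tools | DESIGN/python/ctf-code.py | transform
-- ===== SOURCE A (Python) =====
-- def transform(content, mode):
--     res = ''
--     for i in content:
--         if mode in ('B', 'b', 'bin', '2'):
--             res = res + bin(int(ord(i))).replace('0b', '') + ' '
--         elif mode in ('O', 'o', 'oct', '8'):
--             res = res + oct(int(ord(i))).replace('0o', '') + ' '
--         elif mode in ('D', 'd', 'dec', '10'):
--             res = res + str(ord(i)) + ' '
--         elif mode in ('H', 'h', 'hex', '16'):
--             res = res + hex(int(ord(i))).replace('0x', '') + ' '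
--         else:
--             pass
--     return res
-- ===== SOURCE B (Python) =====
-- _DIGITS = '0123456789abcdef'
--
--
-- def _rep(n, base):
--     # repeated-division base conversion: collect digits least-significant first,
--     # then reverse; one digit alphabet serves all four bases
--     if n == 0:
--         return '0'
--     ds = []
--     while n:
--         ds.append(_DIGITS[n % base])
--         n //= base
--     return ''.join(reversed(ds))
--
--
-- def transform(content, mode):
--     # resolve the mode to a numeric base once, before any looping
--     for aliases, base in ((('B', 'b', 'bin', '2'), 2),
--                           (('O', 'o', 'oct', '8'), 8),
--                           (('D', 'd', 'dec', '10'), 10),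
--                           (('H', 'h', 'hex', '16'), 16)):
--         if mode in aliases:
--             break
--     else:
--         return ''
--     out = []
--     for c in content:
--         out.append(_rep(ord(c), base))
--         out.append(' ')
--     return ''.join(out)
-- ===== Notes on version B (the rewrite author's own statement) =====
-- stated objective: faster
-- what changed: B resolves the mode once to a numeric base, then converts each ordinal by hand-rolled repeated division over a single 16-char digit alphabet (digits collected least-significant first and reversed), collecting pieces in a list joined once, instead of A's per-character four-way mode test with builtin bin/oct/hex formatters, prefix-stripping .replace calls and quadratic string concatenation.
import Mathlib
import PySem

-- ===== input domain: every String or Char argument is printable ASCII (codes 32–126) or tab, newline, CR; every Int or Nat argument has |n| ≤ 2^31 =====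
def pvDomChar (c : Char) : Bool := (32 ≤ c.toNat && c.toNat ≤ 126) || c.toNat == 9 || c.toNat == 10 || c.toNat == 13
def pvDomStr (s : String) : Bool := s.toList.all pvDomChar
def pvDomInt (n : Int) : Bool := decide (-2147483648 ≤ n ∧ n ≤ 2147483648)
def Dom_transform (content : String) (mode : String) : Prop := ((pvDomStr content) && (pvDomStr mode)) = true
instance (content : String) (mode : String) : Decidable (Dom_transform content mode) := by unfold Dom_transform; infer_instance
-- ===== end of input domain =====

-- B resolves the mode once to a numeric base and converts each ordinal by hand-rolled
-- repeated division over a single 16-char digit alphabet (LSB-first digits, reversed),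
-- collecting pieces in a list joined once — instead of A's per-character four-way mode
-- test with builtin formatters, prefix-stripping replace and string accumulation.


-- ===== PORT A =====
-- hand ports of Python's oct()/hex() (PySem provides bin() only), in pyBin's style; exact
def pyOct (n : Int) : String :=
  String.ofList (if n < 0 then '-' :: '0' :: 'o' :: Nat.toDigits 8 n.natAbs
                 else '0' :: 'o' :: Nat.toDigits 8 n.toNat)
def pyHex (n : Int) : String :=
  String.ofList (if n < 0 then '-' :: '0' :: 'x' :: Nat.toDigits 16 n.natAbs
                 else '0' :: 'x' :: Nat.toDigits 16 n.toNat)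

def transform (content : String) (mode : String) : String :=
  content.toList.foldl (fun res i =>
    if mode ∈ ["B", "b", "bin", "2"] then
      res ++ PySem.Str.replace (PySem.Int.pyBin ((i.toNat : Int))) "0b" "" ++ " "
    else if mode ∈ ["O", "o", "oct", "8"] then
      res ++ PySem.Str.replace (pyOct ((i.toNat : Int))) "0o" "" ++ " "
    else if mode ∈ ["D", "d", "dec", "10"] then
      res ++ PySem.Int.toStr ((i.toNat : Int)) ++ " "
    else if mode ∈ ["H", "h", "hex", "16"] then
      res ++ PySem.Str.replace (pyHex ((i.toNat : Int))) "0x" "" ++ " "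
    else res) ""

-- ===== PORT B =====
-- the digit alphabet _DIGITS of Source B
def pyDigitAlphabet : List Char := String.toList "0123456789abcdef"

-- the while-loop of _rep: digits collected least-significant first (fuel = n bounds the
-- iteration count, since n//base < n for base ≥ 2; it only guards totality)
def repLoop (base : Nat) : Nat → Nat → List Char → List Char
  | 0, _, ds => ds
  | fuel + 1, n, ds =>
      if n = 0 then ds
      else repLoop base fuel (n / base) (ds ++ [pyDigitAlphabet.getD (n % base) '?'])

-- _rep of Source B: repeated-division base conversion, then reverse
def pyRep (n : Nat) (base : Nat) : String :=
  if n = 0 then "0" else String.ofList ((repLoop base n n []).reverse)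

-- the alias-group table Source B's for-loop scans (first matching group wins)
def baseTable : List (List String × Nat) :=
  [(["B", "b", "bin", "2"], 2), (["O", "o", "oct", "8"], 8),
   (["D", "d", "dec", "10"], 10), (["H", "h", "hex", "16"], 16)]

def transform_alt (content : String) (mode : String) : String :=
  match baseTable.find? (fun p => p.1.contains mode) with
  | none => ""
  | some (_, base) =>
      PySem.Str.join "" (content.toList.foldl
        (fun out c => out ++ [pyRep c.toNat base, " "]) [])

-- ===== PRECONDITION & SPEC =====
def Spec_transform (content : String) (mode : String) (out : String) : Prop := out = transform_alt content mode
instance (content : String) (mode : String) (out : String) : Decidable (Spec_transform content mode out) := by unfold Spec_transform; infer_instance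

-- ===== CLAIM =====
def Claim_equal_transform : Prop := ∀ (content : String) (mode : String), Dom_transform content mode → Spec_transform content mode (transform content mode)

-- ===== LEMMAS AND PROOFS =====

-- every digit of Nat.toDigitsCore satisfies any predicate that all digit chars below the base do
lemma toDigitsCore_all (P : Char → Prop) (base : Nat) (hb : 0 < base)
    (hd : ∀ m, m < base → P (Nat.digitChar m)) :
    ∀ (fuel n : Nat) (ds : List Char), (∀ c ∈ ds, P c) → ∀ c ∈ Nat.toDigitsCore base fuel n ds, P c := by
  intro fuel
  induction fuel with
  | zero => intro n ds hds c hc; exact hds c hc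
  | succ fuel ih =>
      intro n ds hds c hc
      rw [Nat.toDigitsCore] at hc
      by_cases h : n / base = 0
      · simp only [h, if_pos] at hc
        rcases List.mem_cons.mp hc with h1 | h2
        · exact h1 ▸ hd _ (Nat.mod_lt _ hb)
        · exact hds c h2
      · simp only [h, if_neg, not_false_iff] at hc
        exact ih _ _ (by
          intro c' hc'
          rcases List.mem_cons.mp hc' with h1 | h2
          · exact h1 ▸ hd _ (Nat.mod_lt _ hb)
          · exact hds c' h2) c hc

lemma mark_not_mem_bin (n : Nat) : 'b' ∉ Nat.toDigits 2 n := by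
  intro h
  have := toDigitsCore_all (fun c => c = '0' ∨ c = '1') 2 (by norm_num)
    (by intro m hm; interval_cases m <;> simp [Nat.digitChar])
    (n + 1) n [] (by simp) 'b' h
  simp at this

lemma mark_not_mem_oct (n : Nat) : 'o' ∉ Nat.toDigits 8 n := by
  intro h
  have := toDigitsCore_all (fun c => c.toNat < 58) 8 (by norm_num)
    (by intro m hm; interval_cases m <;> decide)
    (n + 1) n [] (by simp) 'o' h
  simp [Char.toNat] at this

lemma mark_not_mem_hex (n : Nat) : 'x' ∉ Nat.toDigits 16 n := by
  intro h
  have := toDigitsCore_all (fun c => c.toNat < 103) 16 (by norm_num)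
    (by intro m hm; interval_cases m <;> decide)
    (n + 1) n [] (by simp) 'x' h
  simp [Char.toNat] at this

-- replace's scanner never fires when the pattern's second char is absent from the text
lemma replace_go_no_mark (mark : Char) (l acc : List Char) (fuel : Nat)
    (hl : l.length ≤ fuel) (hm : mark ∉ l) :
    PySem.Chars.replace.go ['0', mark] [] fuel l acc = acc.reverse ++ l := by
  induction fuel generalizing l acc with
  | zero => rw [PySem.Chars.replace.go.eq_def]
  | succ fuel ih =>
      cases l with
      | nil => rw [PySem.Chars.replace.go.eq_def]; simp
      | cons c t =>
          rw [PySem.Chars.replace.go.eq_def]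
          have hpre : (['0', mark].isPrefixOf (c :: t)) = false := by
            by_contra h
            have hp : ['0', mark] <+: (c :: t) :=
              List.isPrefixOf_iff_prefix.mp (by simpa using h)
            exact hm (hp.subset (by simp))
          simp only [hpre, Bool.false_eq_true, if_false]
          rw [ih t (c :: acc) (by simpa using Nat.le_of_succ_le_succ (by simpa using hl))
              (fun h => hm (List.mem_cons_of_mem _ h))]
          simp

-- stripping the two-char prefix: replace ('0'::mark::digs) "0mark" "" = digs when mark ∉ digs
lemma replace_strip (mark : Char) (digs : List Char) (hm : mark ∉ digs) :
    PySem.Chars.replace ('0' :: mark :: digs) ['0', mark] [] = digs := by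
  rw [PySem.Chars.replace]
  simp only [List.isEmpty, Bool.false_eq_true, if_false]
  rw [PySem.Chars.replace.go.eq_def]
  have hpre : (['0', mark].isPrefixOf ('0' :: mark :: digs)) = true :=
    List.isPrefixOf_iff_prefix.mpr ⟨digs, rfl⟩
  simp only [List.length_cons, hpre, if_true]
  have hd : List.drop (([] : List Char).length + 1 + 1) ('0' :: mark :: digs) = digs := by simp
  rw [hd, replace_go_no_mark mark digs (([] : List Char).reverse ++ []) (digs.length + 1) (by simp) hm]
  simp

lemma join_empty_cons (x : String) (rest : List String) :
    PySem.Str.join "" (x :: rest) = x ++ PySem.Str.join "" rest := by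
  cases rest with
  | nil =>
      apply String.toList_inj.mp
      simp [PySem.Str.join, PySem.Chars.join_singleton, PySem.Chars.join_nil]
  | cons y t =>
      apply String.toList_inj.mp
      simp [PySem.Str.join, PySem.Chars.join_cons_cons]

-- A's accumulating fold equals ''.join of the per-char pieces
lemma foldl_eq_join (g : Char → String) (cs : List Char) (res : String) :
    cs.foldl (fun r c => r ++ g c ++ " ") res
      = res ++ PySem.Str.join "" (cs.map (fun c => g c ++ " ")) := by
  induction cs generalizing res with
  | nil => simp [PySem.Str.join, PySem.Chars.join_nil]
  | cons c t ih =>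
      simp only [List.foldl_cons, List.map_cons, ih, join_empty_cons]
      apply String.toList_inj.mp
      simp

lemma char_cast_nonneg (c : Char) : ¬ ((c.toNat : Int) < 0) :=
  Int.not_lt.mpr (Int.natCast_nonneg _)

lemma per_char_bin (c : Char) :
    PySem.Str.replace (PySem.Int.pyBin ((c.toNat : Int))) "0b" "" = String.ofList (Nat.toDigits 2 c.toNat) := by
  apply String.toList_inj.mp
  simp only [PySem.Str.replace, PySem.Int.pyBin, PySem.Int.toBinChars0b, char_cast_nonneg c, if_false]
  simp only [String.toList_ofList]
  have h1 : (String.toList "0b") = ['0', 'b'] := rfl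
  have h2 : (String.toList "") = [] := rfl
  have h3 : ((c.toNat : Int)).toNat = c.toNat := by simp
  rw [h1, h2, h3, replace_strip 'b' _ (mark_not_mem_bin _)]

lemma per_char_oct (c : Char) :
    PySem.Str.replace (pyOct ((c.toNat : Int))) "0o" "" = String.ofList (Nat.toDigits 8 c.toNat) := by
  apply String.toList_inj.mp
  simp only [PySem.Str.replace, pyOct, char_cast_nonneg c, if_false]
  simp only [String.toList_ofList]
  have h1 : (String.toList "0o") = ['0', 'o'] := rfl
  have h2 : (String.toList "") = [] := rfl
  have h3 : ((c.toNat : Int)).toNat = c.toNat := by simp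
  rw [h1, h2, h3, replace_strip 'o' _ (mark_not_mem_oct _)]

lemma per_char_hex (c : Char) :
    PySem.Str.replace (pyHex ((c.toNat : Int))) "0x" "" = String.ofList (Nat.toDigits 16 c.toNat) := by
  apply String.toList_inj.mp
  simp only [PySem.Str.replace, pyHex, char_cast_nonneg c, if_false]
  simp only [String.toList_ofList]
  have h1 : (String.toList "0x") = ['0', 'x'] := rfl
  have h2 : (String.toList "") = [] := rfl
  have h3 : ((c.toNat : Int)).toNat = c.toNat := by simp
  rw [h1, h2, h3, replace_strip 'x' _ (mark_not_mem_hex _)]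

lemma per_char_dec (c : Char) :
    PySem.Int.toStr ((c.toNat : Int)) = String.ofList (Nat.toDigits 10 c.toNat) := by
  simp [PySem.Int.toStr, PySem.Int.toChars, char_cast_nonneg c]

lemma foldl_keep (cs : List Char) (r : String) : cs.foldl (fun r _ => r) r = r := by
  induction cs <;> simp_all

-- the digit alphabet agrees with Nat.digitChar below 16
lemma alphabet_digitChar (m : Nat) (hm : m < 16) :
    pyDigitAlphabet.getD m '?' = Nat.digitChar m := by
  interval_cases m <;> decide

-- repLoop's reversed LSB-first digit list is exactly toDigitsCore's MSB-first one
lemma repLoop_toDigitsCore (base : Nat) (hb : 2 ≤ base) (hb16 : base ≤ 16) :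
    ∀ (fuel1 : Nat) (n : Nat) (fuel2 : Nat) (ds1 : List Char) (ds2 : List Char),
      n ≤ fuel1 → n ≤ fuel2 → n ≠ 0 →
      (repLoop base fuel1 n ds1).reverse ++ ds2
        = Nat.toDigitsCore base (fuel2 + 1) n (ds1.reverse ++ ds2) := by
  intro fuel1
  induction fuel1 with
  | zero => intro n _ _ _ h1 _ h0; omega
  | succ fuel1 ih =>
      intro n fuel2 ds1 ds2 h1 h2 h0
      rw [repLoop, if_neg h0, Nat.toDigitsCore]
      have hdig : pyDigitAlphabet.getD (n % base) '?' = Nat.digitChar (n % base) :=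
        alphabet_digitChar _ (lt_of_lt_of_le (Nat.mod_lt _ (by omega)) hb16)
      by_cases hq : n / base = 0
      · rw [if_pos hq, hq]
        have : repLoop base fuel1 0 (ds1 ++ [pyDigitAlphabet.getD (n % base) '?'])
            = ds1 ++ [pyDigitAlphabet.getD (n % base) '?'] := by
          cases fuel1 <;> simp [repLoop]
        rw [this, hdig]
        simp
      · rw [if_neg hq]
        have hlt : n / base < n := Nat.div_lt_self (by omega) (by omega)
        cases fuel2 with
        | zero => omega
        | succ fuel2 =>
            rw [ih (n / base) fuel2 (ds1 ++ [pyDigitAlphabet.getD (n % base) '?']) ds2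
                (by omega) (by omega) hq]
            have hdig' : pyDigitAlphabet[n % base]?.getD '?' = Nat.digitChar (n % base) := by
              simpa [List.getD] using hdig
            simp [hdig']

-- _rep computes the same digit string as Nat.toDigits
lemma pyRep_eq_toDigits (base : Nat) (hb : 2 ≤ base) (hb16 : base ≤ 16) (n : Nat) :
    pyRep n base = String.ofList (Nat.toDigits base n) := by
  by_cases h0 : n = 0
  · subst h0
    have : Nat.toDigits base 0 = ['0'] := by
      rw [Nat.toDigits, Nat.toDigitsCore]
      simp [Nat.digitChar]
    rw [pyRep, if_pos rfl, this]
  · rw [pyRep, if_neg h0, Nat.toDigits]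
    congr 1
    have := repLoop_toDigitsCore base hb hb16 n n n [] [] (le_refl n) (le_refl n) h0
    simpa using this

-- B's list-of-pieces fold, joined, equals the join of per-char "digits + space" strings
lemma join_pieces (g : Char → String) (cs : List Char) :
    PySem.Str.join "" (cs.foldl (fun out c => out ++ [g c, " "]) [])
      = PySem.Str.join "" (cs.map (fun c => g c ++ " ")) := by
  rw [PySem.List.foldl_append_eq_flatMap]
  simp only [List.nil_append]
  induction cs with
  | nil => rfl
  | cons c t ih =>
      simp only [List.flatMap_cons, List.map_cons, List.cons_append,
        List.nil_append]
      rw [join_empty_cons, join_empty_cons, join_empty_cons, ih, String.append_assoc]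

-- one case: mode belongs to the given alias group, which resolves to base b
lemma case_group (content mode : String) (b : Nat) (hb : 2 ≤ b) (hb16 : b ≤ 16)
    (grp : List String)
    (hfind : baseTable.find? (fun p => p.1.contains mode) = some (grp, b))
    (gA : Char → String)
    (hbody : (fun (res : String) (i : Char) =>
      if mode ∈ ["B", "b", "bin", "2"] then
        res ++ PySem.Str.replace (PySem.Int.pyBin ((i.toNat : Int))) "0b" "" ++ " "
      else if mode ∈ ["O", "o", "oct", "8"] then
        res ++ PySem.Str.replace (pyOct ((i.toNat : Int))) "0o" "" ++ " "
      else if mode ∈ ["D", "d", "dec", "10"] then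
        res ++ PySem.Int.toStr ((i.toNat : Int)) ++ " "
      else if mode ∈ ["H", "h", "hex", "16"] then
        res ++ PySem.Str.replace (pyHex ((i.toNat : Int))) "0x" "" ++ " "
      else res) = fun res i => res ++ gA i ++ " ")
    (hg : ∀ c : Char, gA c = String.ofList (Nat.toDigits b c.toNat)) :
    transform content mode = transform_alt content mode := by
  have hpiece : (fun c : Char => pyRep c.toNat b ++ " ") = fun c : Char => gA c ++ " " := by
    funext c; rw [hg c, pyRep_eq_toDigits b hb hb16]
  unfold transform transform_alt
  rw [hbody, foldl_eq_join, hfind]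
  simp only [join_pieces, hpiece]
  simp

-- ===== VERDICT =====
theorem transform_spec : Claim_equal_transform := by
  intro content mode _
  unfold Spec_transform
  by_cases hB : mode ∈ (["B", "b", "bin", "2"] : List String)
  · refine case_group content mode 2 (by norm_num) (by norm_num) ["B", "b", "bin", "2"] ?_ _
      (by funext res i; rw [if_pos hB]) (fun c => per_char_bin c)
    fin_cases hB <;> decide
  · by_cases hO : mode ∈ (["O", "o", "oct", "8"] : List String)
    · refine case_group content mode 8 (by norm_num) (by norm_num) ["O", "o", "oct", "8"] ?_ _
        (by funext res i; rw [if_neg hB, if_pos hO]) (fun c => per_char_oct c)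
      fin_cases hO <;> decide
    · by_cases hD : mode ∈ (["D", "d", "dec", "10"] : List String)
      · refine case_group content mode 10 (by norm_num) (by norm_num) ["D", "d", "dec", "10"] ?_ _
          (by funext res i; rw [if_neg hB, if_neg hO, if_pos hD]) (fun c => per_char_dec c)
        fin_cases hD <;> decide
      · by_cases hH : mode ∈ (["H", "h", "hex", "16"] : List String)
        · refine case_group content mode 16 (by norm_num) (by norm_num) ["H", "h", "hex", "16"] ?_ _
            (by funext res i; rw [if_neg hB, if_neg hO, if_neg hD, if_pos hH]) (fun c => per_char_hex c)
          fin_cases hH <;> decide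
        · have hfind : baseTable.find? (fun p => p.1.contains mode) = none := by
            have hB' := hB; have hO' := hO; have hD' := hD; have hH' := hH
            simp only [List.mem_cons, List.not_mem_nil, or_false, not_or] at hB' hO' hD' hH'
            rw [List.find?_eq_none]
            intro p hp
            simp only [baseTable, List.mem_cons, List.not_mem_nil, or_false] at hp
            rcases hp with h | h | h | h <;> subst h <;> simp <;> tauto
          unfold transform transform_alt
          rw [hfind]
          have hbody : (fun (res : String) (i : Char) =>
              if mode ∈ ["B", "b", "bin", "2"] then
                res ++ PySem.Str.replace (PySem.Int.pyBin ((i.toNat : Int))) "0b" "" ++ " "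
              else if mode ∈ ["O", "o", "oct", "8"] then
                res ++ PySem.Str.replace (pyOct ((i.toNat : Int))) "0o" "" ++ " "
              else if mode ∈ ["D", "d", "dec", "10"] then
                res ++ PySem.Int.toStr ((i.toNat : Int)) ++ " "
              else if mode ∈ ["H", "h", "hex", "16"] then
                res ++ PySem.Str.replace (pyHex ((i.toNat : Int))) "0x" "" ++ " "
              else res)
              = fun (res : String) (_ : Char) => res := by
            funext res i; rw [if_neg hB, if_neg hO, if_neg hD, if_neg hH]
          rw [hbody, foldl_keep]
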